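-- pv_equiv track=rewrite | github.com/swsilver95/TIL | algorithm/Programmers/naver-financial/s1.py | solution
-- ===== SOURCE A (Python) =====
-- from collections import defaultdict
--
-- def solution(id_list, k):
--     coupons = defaultdict(int)
--     for d in id_list:
--         ids = list(map(str, d.split()))
--         ids = set(ids)
--         for id in ids:
--             if coupons[id] < k:
--                 coupons[id] += 1
--
--     answer = 0
--     for id, coupon in coupons.items():
--         answer += coupon
--
--     return answer
-- ===== SOURCE B (Python) =====
-- def solution(id_list, k):
--     # Brute force, no counting dict: gather the distinct ids in first-appearance
--     # order, then for each id scan all entries and count how many mention it,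
--     # capping the contribution at k.
--     words = [d.split() for d in id_list]
--     distinct = list(dict.fromkeys(w for ws in words for w in ws))
--     return sum(min(sum(1 for ws in words if i in ws), k) for i in distinct)
-- ===== Notes on version B (the rewrite author's own statement) =====
-- stated objective: alternative
-- what changed: A maintains a defaultdict and caps each id's count at k inline while streaming the entries once; B uses no counting structure at all: it lists the distinct ids once, then for each id brute-force scans every entry counting membership, capping only in the final sum.
-- outside the precondition, e.g. on solution(['a'], -1): A returns 0, B returns -1
import Mathlib
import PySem

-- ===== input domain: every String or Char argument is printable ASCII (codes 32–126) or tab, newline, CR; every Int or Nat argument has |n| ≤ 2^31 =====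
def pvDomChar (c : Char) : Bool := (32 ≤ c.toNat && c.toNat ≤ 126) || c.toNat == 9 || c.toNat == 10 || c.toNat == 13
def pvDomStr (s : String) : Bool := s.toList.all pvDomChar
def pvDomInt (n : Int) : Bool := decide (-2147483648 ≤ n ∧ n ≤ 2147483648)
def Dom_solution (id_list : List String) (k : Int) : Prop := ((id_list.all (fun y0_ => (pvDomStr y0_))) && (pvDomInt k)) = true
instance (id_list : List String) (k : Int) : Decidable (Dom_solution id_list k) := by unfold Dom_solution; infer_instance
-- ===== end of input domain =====

-- B drops the counting dict entirely: it lists the distinct ids once, then brute-force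
-- scans all entries per id, capping each id's contribution at k only in the final sum.

-- ===== PORT A =====
-- for d in id_list: for id in set(d.split()): if coupons[id] < k: coupons[id] += 1
-- (defaultdict access coupons[id] inserts the key with 0: ported as setdefault)
def solution (id_list : List String) (k : Int) : Int :=
  let coupons : PySem.Dict String Int :=
    id_list.foldl (fun coupons d =>
      (PySem.Set.ofList (PySem.Str.split₀ d)).foldl (fun coupons i =>
        let coupons := coupons.setdefault i 0
        if coupons.getD i 0 < k then coupons.insert i (coupons.getD i 0 + 1) else coupons)
        coupons)
      PySem.Dict.empty
  coupons.items.foldl (fun answer p => answer + p.2) 0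

-- ===== PORT B =====
-- words = [d.split() for d in id_list]; distinct = list(dict.fromkeys(flattened words));
-- sum(min(sum(1 for ws in words if i in ws), k) for i in distinct)
def solution_alt (id_list : List String) (k : Int) : Int :=
  let words := id_list.map (fun d => PySem.Str.split₀ d)
  let distinct := PySem.List.dedup (words.flatMap (fun ws => ws))
  distinct.foldl (fun acc i =>
    acc + min (words.foldl (fun c ws => if i ∈ ws then c + 1 else c) 0) k) 0

-- ===== PRECONDITION & SPEC =====
-- Pre_ excludes k < 0, where A returns 0 (the guarded increment never fires) and B's
-- natural count-then-cap sum returns k per distinct id; both are defensible readings of a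
-- nonsensical negative cap, so those inputs are carved out rather than matched.
def Pre_solution (id_list : List String) (k : Int) : Prop := 0 ≤ k
instance (id_list : List String) (k : Int) : Decidable (Pre_solution id_list k) := by unfold Pre_solution; infer_instance
def pvWitness_solution : List String × Int := (["a b", "a"], 2)

def Spec_solution (id_list : List String) (k : Int) (out : Int) : Prop := out = solution_alt id_list k
instance (id_list : List String) (k : Int) (out : Int) : Decidable (Spec_solution id_list k out) := by unfold Spec_solution; infer_instance

-- ===== CLAIM (what is proved, stated in full; the proofs are below) =====
def Claim_equal_solution : Prop := ∀ (id_list : List String) (k : Int), Dom_solution id_list k → Pre_solution id_list k → Spec_solution id_list k (solution id_list k)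

-- ===== LEMMAS AND PROOFS =====

-- A's per-id step (defaultdict access + guarded increment)
def pvStep (k : Int) (a : PySem.Dict String Int) (i : String) : PySem.Dict String Int :=
  if (a.setdefault i 0).getD i 0 < k then
    (a.setdefault i 0).insert i ((a.setdefault i 0).getD i 0 + 1)
  else a.setdefault i 0

theorem pvStep_keys (k : Int) (a : PySem.Dict String Int) (i : String) :
    (pvStep k a i).keys = PySem.Set.add a.keys i := by
  unfold pvStep
  rw [PySem.Set.add_eq_ite]
  cases hc : a.contains i with
  | true =>
    have hm : i ∈ a.keys := (PySem.Dict.contains_iff_mem_keys a i).mp hc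
    rw [PySem.Dict.setdefault_of_contains a 0 hc, if_pos hm]
    split_ifs with h
    · exact PySem.Dict.keys_insert_of_contains a _ hc
    · rfl
  | false =>
    have hm : i ∉ a.keys := fun h => by
      rw [(PySem.Dict.contains_iff_mem_keys a i).mpr h] at hc; exact Bool.noConfusion hc
    rw [PySem.Dict.setdefault_of_not_contains a 0 hc, if_neg hm]
    have hc' : (a.insert i 0).contains i = true := PySem.Dict.contains_insert_self a i 0
    split_ifs with h
    · rw [PySem.Dict.keys_insert_of_contains _ _ hc',
        PySem.Dict.keys_insert_of_not_contains a _ hc]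
    · exact PySem.Dict.keys_insert_of_not_contains a _ hc

theorem pvStep_getD (k : Int) (a : PySem.Dict String Int) (i j : String) :
    (pvStep k a i).getD j 0 =
      if j = i then (if a.getD i 0 < k then a.getD i 0 + 1 else a.getD i 0)
      else a.getD j 0 := by
  unfold pvStep
  cases hc : a.contains i with
  | true =>
    rw [PySem.Dict.setdefault_of_contains a 0 hc]
    by_cases hj : j = i
    · subst hj; rw [if_pos rfl]
      split_ifs with hlt
      · simp
      · rfl
    · rw [if_neg hj]
      split_ifs with hlt
      · simp [PySem.Dict.getD_insert, hj]
      · rfl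
  | false =>
    have h0 : a.getD i 0 = 0 := PySem.Dict.getD_of_not_contains a 0 hc
    rw [PySem.Dict.setdefault_of_not_contains a 0 hc, PySem.Dict.getD_insert_self]
    by_cases hj : j = i
    · subst hj; rw [if_pos rfl, h0]
      split_ifs with hlt <;> simp
    · rw [if_neg hj]
      split_ifs with hlt <;> simp [PySem.Dict.getD_insert, hj]

-- inner loop over one entry's distinct-id list
theorem pvInner (k : Int) (L : List String) (hnd : L.Nodup) (a : PySem.Dict String Int) :
    (L.foldl (pvStep k) a).keys = PySem.Set.update a.keys L ∧
    ∀ j, (L.foldl (pvStep k) a).getD j 0 =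
      if j ∈ L then (if a.getD j 0 < k then a.getD j 0 + 1 else a.getD j 0)
      else a.getD j 0 := by
  induction L generalizing a with
  | nil => exact ⟨(PySem.Set.update_nil a.keys).symm, fun j => by simp⟩
  | cons x L ih =>
    obtain ⟨hx, hnd'⟩ := List.nodup_cons.mp hnd
    obtain ⟨ihk, ihv⟩ := ih hnd' (pvStep k a x)
    refine ⟨?_, fun j => ?_⟩
    · rw [List.foldl_cons, ihk, pvStep_keys, PySem.Set.update_cons]
    · rw [List.foldl_cons, ihv j, pvStep_getD]
      by_cases hji : j = x
      · subst hji
        simp [hx]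
      · by_cases hjL : j ∈ L <;> simp [hji, hjL]

-- per-id appearance count over a list of entries
def pvCnt (P : List String) (j : String) : Int :=
  (P.countP (fun d => decide (j ∈ PySem.Str.split₀ d)) : Int)

-- outer loop over the entries, with an abstract already-accumulated count c
theorem pvOuter (k : Int) (rest : List String) (c : String → Int)
    (a : PySem.Dict String Int) (hnd : a.keys.Nodup)
    (hv : ∀ j, a.getD j 0 = min (c j) k) :
    (rest.foldl (fun d e => (PySem.Set.ofList (PySem.Str.split₀ e)).foldl (pvStep k) d) a).keys.Nodup ∧
    (∀ j, j ∈ (rest.foldl (fun d e => (PySem.Set.ofList (PySem.Str.split₀ e)).foldl (pvStep k) d) a).keys ↔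
      j ∈ a.keys ∨ ∃ e ∈ rest, j ∈ PySem.Str.split₀ e) ∧
    (∀ j, (rest.foldl (fun d e => (PySem.Set.ofList (PySem.Str.split₀ e)).foldl (pvStep k) d) a).getD j 0
      = min (c j + pvCnt rest j) k) := by
  induction rest generalizing c a with
  | nil =>
    refine ⟨hnd, fun j => by simp, fun j => ?_⟩
    simp [pvCnt, hv j]
  | cons d rest ih =>
    obtain ⟨hk1, hv1⟩ := pvInner k (PySem.Set.ofList (PySem.Str.split₀ d))
      (PySem.Set.nodup_ofList _) a
    set a' := (PySem.Set.ofList (PySem.Str.split₀ d)).foldl (pvStep k) a with ha'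
    have hnd' : a'.keys.Nodup := by rw [hk1]; exact PySem.Set.nodup_update _ _ hnd
    have hmem' : ∀ j, j ∈ a'.keys ↔ j ∈ a.keys ∨ j ∈ PySem.Str.split₀ d := fun j => by
      rw [hk1, PySem.Set.mem_update, PySem.Set.mem_ofList]
    have hv' : ∀ j, a'.getD j 0 =
        min (c j + (if decide (j ∈ PySem.Str.split₀ d) then (1:Int) else 0)) k := by
      intro j
      rw [hv1 j, hv j]
      by_cases hj : j ∈ PySem.Str.split₀ d
      · simp only [PySem.Set.mem_ofList, hj, if_pos, decide_eq_true_eq]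
        split_ifs <;> omega
      · simp only [PySem.Set.mem_ofList, hj, decide_eq_true_eq]
        split_ifs <;> omega
    obtain ⟨rk, rm, rv⟩ := ih (fun j => c j + (if decide (j ∈ PySem.Str.split₀ d) then (1:Int) else 0)) a' hnd' hv'
    refine ⟨rk, fun j => ?_, fun j => ?_⟩
    · rw [List.foldl_cons, ← ha', rm j, hmem' j]
      simp only [List.mem_cons]
      constructor
      · rintro ((h | h) | ⟨e, he, hj⟩)
        · exact Or.inl h
        · exact Or.inr ⟨d, Or.inl rfl, h⟩
        · exact Or.inr ⟨e, Or.inr he, hj⟩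
      · rintro (h | ⟨e, (rfl | he), hj⟩)
        · exact Or.inl (Or.inl h)
        · exact Or.inl (Or.inr hj)
        · exact Or.inr ⟨e, he, hj⟩
    · rw [List.foldl_cons, ← ha', rv j]
      have hcc : pvCnt (d :: rest) j =
          (if decide (j ∈ PySem.Str.split₀ d) then (1:Int) else 0) + pvCnt rest j := by
        simp only [pvCnt, List.countP_cons]
        split_ifs <;> push_cast <;> omega
      rw [hcc]
      ring_nf

-- ===== VERDICT (by name: the statement is the Claim_ definition above) =====
theorem solution_spec : Claim_equal_solution := by
  intro id_list k _ hk
  unfold Spec_solution solution solution_alt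
  dsimp only
  have hstep : (fun (cp : PySem.Dict String Int) (i : String) =>
      if (cp.setdefault i 0).getD i 0 < k then
        (cp.setdefault i 0).insert i ((cp.setdefault i 0).getD i 0 + 1)
      else cp.setdefault i 0) = pvStep k := rfl
  rw [hstep]
  obtain ⟨hnd, hmem, hval⟩ := pvOuter k id_list (fun _ => 0) PySem.Dict.empty
    (by simp [PySem.Dict.keys, PySem.Dict.empty])
    (fun j => by rw [PySem.Dict.getD_empty]; exact (min_eq_left hk).symm)
  set coupons := id_list.foldl
    (fun d e => (PySem.Set.ofList (PySem.Str.split₀ e)).foldl (pvStep k) d)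
    (PySem.Dict.empty : PySem.Dict String Int) with hc
  -- A's answer is the sum of min (pvCnt id_list j) k over coupons.keys
  have hA : coupons.items.foldl (fun answer p => answer + p.2) 0
      = (coupons.keys.map (fun j => min (pvCnt id_list j) k)).sum := by
    rw [PySem.List.foldl_add _ (fun (p : String × Int) => p.2) 0, zero_add]
    have hvm : List.map (fun (p : String × Int) => p.2) coupons.items = coupons.values := rfl
    rw [hvm, PySem.Dict.values_eq_map_keys coupons hnd 0]
    exact congrArg List.sum (List.map_congr_left fun j _ => by rw [hval j, zero_add])
  -- B's answer is the same sum over the dedup'd flattened word list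
  have hBin : ∀ j : String,
      (id_list.map (fun d => PySem.Str.split₀ d)).foldl
        (fun c ws => if j ∈ ws then c + 1 else c) (0:Int) = pvCnt id_list j := by
    intro j
    rw [PySem.List.foldl_ite_add_one (fun ws => j ∈ ws) _ 0, zero_add, List.countP_map]
    rfl
  have hB : (PySem.List.dedup ((id_list.map (fun d => PySem.Str.split₀ d)).flatMap (fun ws => ws))).foldl
      (fun acc i => acc + min ((id_list.map (fun d => PySem.Str.split₀ d)).foldl
        (fun c ws => if i ∈ ws then c + 1 else c) 0) k) 0
      = ((PySem.List.dedup ((id_list.map (fun d => PySem.Str.split₀ d)).flatMap (fun ws => ws))).map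
          (fun j => min (pvCnt id_list j) k)).sum := by
    rw [PySem.List.foldl_add _ (fun i => min ((id_list.map (fun d => PySem.Str.split₀ d)).foldl
      (fun c ws => if i ∈ ws then c + 1 else c) 0) k) 0, zero_add]
    exact congrArg List.sum (List.map_congr_left fun j _ => by rw [hBin j])
  rw [hA, hB]
  -- the two index lists are permutations: both Nodup with the same membership
  have hperm : coupons.keys.Perm
      (PySem.List.dedup ((id_list.map (fun d => PySem.Str.split₀ d)).flatMap (fun ws => ws))) := by
    rw [List.perm_ext_iff_of_nodup hnd (PySem.List.nodup_dedup _)]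
    intro j
    rw [hmem j, PySem.List.mem_dedup]
    simp only [List.mem_flatMap, List.mem_map, PySem.Dict.keys_empty, List.not_mem_nil, false_or]
    constructor
    · rintro ⟨e, he, hj⟩; exact ⟨PySem.Str.split₀ e, ⟨e, he, rfl⟩, hj⟩
    · rintro ⟨ws, ⟨e, he, rfl⟩, hj⟩; exact ⟨e, he, hj⟩
  exact (hperm.map _).sum_eq
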